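-- pv_equiv track=rewrite | github.com/daylinmorgan/cellMorph | scripts/old/imgStitch.py | newGrid
-- ===== SOURCE A (Python) =====
-- def newGrid(n: int) -> list:
--     """
--     Makes grid outputs align with matplotlib subplots. IE grid numbering for a 3x3 split looks like:
--
--     1, 4, 7
--     2, 5, 8
--     3, 6, 9
--
--     However subplots do not go in this order. This outputs a list that allows for loading of the correct images
--     """
--     newGrid = []
--     for i in range(1, n + 1):
--         gridNum = i
--         for j in range(1, n + 1):
--             newGrid.append(gridNum)
--             gridNum += n
--     return newGrid
-- ===== SOURCE B (Python) =====
-- def newGrid(n: int) -> list: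
--     # Stage 1: the grid's rows in row-major numbering (row r is r*n+1 .. r*n+n).
--     rows = (range(r * n + 1, r * n + n + 1) for r in range(n))
--     # Stage 2: transpose with zip; reading the rows column by column yields the
--     # column-major order matplotlib subplots expect.
--     out = []
--     for col in zip(*rows):
--         out.extend(col)
--     return out
-- ===== Notes on version B (the rewrite author's own statement) =====
-- stated objective: alternative
-- what changed: B materializes the grid's row-major rows and transposes them with zip to emit the column-major order, instead of A's nested loops generating each column as a running arithmetic progression with a mutating accumulator.
import Mathlib
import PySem

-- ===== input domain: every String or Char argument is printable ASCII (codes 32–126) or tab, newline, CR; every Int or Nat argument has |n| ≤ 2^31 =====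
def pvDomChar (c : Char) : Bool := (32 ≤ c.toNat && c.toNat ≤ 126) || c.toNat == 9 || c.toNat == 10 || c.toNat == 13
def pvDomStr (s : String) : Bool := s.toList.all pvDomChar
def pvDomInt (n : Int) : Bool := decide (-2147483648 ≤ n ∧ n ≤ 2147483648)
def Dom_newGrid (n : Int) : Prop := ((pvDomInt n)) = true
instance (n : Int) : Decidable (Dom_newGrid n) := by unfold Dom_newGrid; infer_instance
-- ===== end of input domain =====

-- B materializes the grid's row-major rows and transposes them with zip into the
-- column-major order, instead of A's nested loops with a running accumulator;
-- objective: alternative decomposition (same cost).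

-- ===== PORT A =====
-- for i in range(1, n+1): gridNum = i; for j in range(1, n+1): append(gridNum); gridNum += n
def newGrid (n : Int) : List Int :=
  (PySem.List.pyRange 1 (n + 1) 1).foldl
    (fun acc i =>
      ((PySem.List.pyRange 1 (n + 1) 1).foldl
        (fun (s : List Int × Int) _ => (s.1 ++ [s.2], s.2 + n))
        (acc, i)).1)
    []

-- ===== PORT B =====
-- termination measure for zipStar (cited by its decreasing_by)
theorem zipStar_dec (ls : List (List Int)) (h : ls ≠ [] ∧ ∀ l ∈ ls, l ≠ []) :
    ((ls.map List.tail).map List.length).sum < (ls.map List.length).sum := by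
  obtain ⟨hne, hall⟩ := h
  induction ls with
  | nil => exact absurd rfl hne
  | cons l t ih =>
      simp only [List.map_cons, List.sum_cons]
      have hl : l ≠ [] := hall l (List.mem_cons_self)
      have hlen : l.tail.length < l.length := by
        cases l with
        | nil => exact absurd rfl hl
        | cons a l' => simp
      rcases eq_or_ne t [] with rfl | hne'
      · simpa using hlen
      · have := ih hne' (fun l hl => hall l (List.mem_cons_of_mem _ hl))
        omega

-- hand-written port of Python's zip(*rows): one column of heads per step,
-- stopping as soon as the argument list is empty or some row is exhausted
def zipStar (ls : List (List Int)) : List (List Int) :=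
  if h : ls ≠ [] ∧ ∀ l ∈ ls, l ≠ [] then
    (ls.map (fun l => l.headD 0)) :: zipStar (ls.map List.tail)
  else []
termination_by ((ls.map List.length).sum)
decreasing_by simpa [List.map_map] using zipStar_dec ls h

-- rows = (range(r*n+1, r*n+n+1) for r in range(n)); for col in zip(*rows): out.extend(col)
def newGrid_alt (n : Int) : List Int :=
  (zipStar ((PySem.List.pyRange 0 n 1).map
      (fun r => PySem.List.pyRange (r * n + 1) (r * n + n + 1) 1))).foldl
    (fun out col => out ++ col) []

-- ===== PRECONDITION & SPEC =====
def Spec_newGrid (n : Int) (out : List Int) : Prop := out = newGrid_alt n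
instance (n : Int) (out : List Int) : Decidable (Spec_newGrid n out) := by unfold Spec_newGrid; infer_instance

-- ===== CLAIM =====
def Claim_equal_newGrid : Prop := ∀ (n : Int), Dom_newGrid n → Spec_newGrid n (newGrid n)

-- ===== LEMMAS AND PROOFS =====

-- the column-major (matplotlib subplot) order both programs produce
def colM (n : Int) : List Int :=
  (List.range n.toNat).flatMap
    (fun (c : Nat) => (List.range n.toNat).map (fun (r : Nat) => 1 + (c : Int) + (r : Int) * n))

-- A's inner loop appends the arithmetic progression g, g+n, g+2n, …
theorem newGrid_inner (n : Int) : ∀ (l : List Int) (acc : List Int) (g : Int),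
    (l.foldl (fun (s : List Int × Int) _ => (s.1 ++ [s.2], s.2 + n)) (acc, g)).1
      = acc ++ (List.range l.length).map (fun (j : Nat) => g + (j : Int) * n) := by
  intro l
  induction l with
  | nil => intro acc g; simp
  | cons x t ih =>
      intro acc g
      rw [List.foldl_cons, ih, List.append_assoc, List.length_cons,
          List.range_succ_eq_map, List.map_cons, List.map_map, List.singleton_append]
      congr 1
      congr 1
      · simp
      · apply List.map_congr_left
        intro j _
        simp only [Function.comp]
        push_cast
        ring

theorem A_eq_colM (n : Int) : newGrid n = colM n := by
  have hA : ∀ (acc : List Int) (i : Int),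
      ((PySem.List.pyRange 1 (n + 1) 1).foldl
        (fun (s : List Int × Int) _ => (s.1 ++ [s.2], s.2 + n)) (acc, i)).1
        = acc ++ (List.range (PySem.List.pyRange 1 (n + 1) 1).length).map
            (fun (j : Nat) => i + (j : Int) * n) := by
    intro acc i; exact newGrid_inner n _ acc i
  simp only [newGrid, colM, hA]
  rw [PySem.List.foldl_append_eq_flatMap, List.nil_append,
      PySem.List.length_pyRange_one, PySem.List.pyRange_one 1 (n + 1)]
  have hn : (n + 1 - 1 : Int) = n := by ring
  rw [hn, List.flatMap_map]

-- zip(*rows) of a nonempty list of equal-length rows is the list of columns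
theorem zipStar_square : ∀ (k : Nat) (ls : List (List Int)), ls ≠ [] →
    (∀ l ∈ ls, l.length = k) →
    zipStar ls = (List.range k).map (fun i => ls.map (fun l => l.getD i 0)) := by
  intro k
  induction k with
  | zero =>
      intro ls hne hlen
      rw [zipStar]
      rw [dif_neg, List.range_zero, List.map_nil]
      rintro ⟨h1, h2⟩
      obtain ⟨l, hl⟩ := List.exists_mem_of_ne_nil ls hne
      exact h2 l hl (List.eq_nil_of_length_eq_zero (hlen l hl))
  | succ k ih =>
      intro ls hne hlen
      have hnil : ∀ l ∈ ls, l ≠ [] := by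
        intro l hl h
        have := hlen l hl
        simp [h] at this
      rw [zipStar, dif_pos ⟨hne, hnil⟩]
      have htne : ls.map List.tail ≠ [] := by
        intro h
        exact hne (List.map_eq_nil_iff.mp h)
      have htlen : ∀ l ∈ ls.map List.tail, l.length = k := by
        intro l hl
        obtain ⟨l', hl', rfl⟩ := List.mem_map.mp hl
        have hlen' := hlen l' hl'
        have hne' := hnil l' hl'
        cases l' with
        | nil => exact absurd rfl hne'
        | cons a t => simpa using hlen'
      rw [ih (ls.map List.tail) htne htlen]
      rw [List.range_succ_eq_map, List.map_cons, List.map_map]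
      congr 1
      · apply List.map_congr_left
        intro l hl
        have hne' := hnil l hl
        cases l with
        | nil => exact absurd rfl hne'
        | cons a t => rfl
      · apply List.map_congr_left
        intro i _
        simp only [Function.comp, List.map_map]
        apply List.map_congr_left
        intro l hl
        have hne' := hnil l hl
        cases l with
        | nil => exact absurd rfl hne'
        | cons a t => rfl

theorem foldl_append_id : ∀ (cols : List (List Int)) (init : List Int),
    cols.foldl (fun out col => out ++ col) init = init ++ cols.flatMap id := by
  intro cols
  induction cols with
  | nil => intro init; simp
  | cons c t ih => intro init; simp [ih, List.append_assoc]

theorem newGrid_spec : Claim_equal_newGrid := by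
  unfold Claim_equal_newGrid Spec_newGrid
  intro n _
  rw [A_eq_colM]
  show colM n = newGrid_alt n
  unfold newGrid_alt
  by_cases hn : 0 < n
  · have hne : (PySem.List.pyRange 0 n 1).map
        (fun r => PySem.List.pyRange (r * n + 1) (r * n + n + 1) 1) ≠ [] := by
      have : (0 : Int) ∈ PySem.List.pyRange 0 n 1 := by
        rw [PySem.List.mem_pyRange_one]; omega
      intro h
      rw [List.map_eq_nil_iff] at h
      rw [h] at this
      exact absurd this (List.not_mem_nil)
    have hlen : ∀ l ∈ (PySem.List.pyRange 0 n 1).map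
        (fun r => PySem.List.pyRange (r * n + 1) (r * n + n + 1) 1), l.length = n.toNat := by
      intro l hl
      obtain ⟨r, _, rfl⟩ := List.mem_map.mp hl
      rw [PySem.List.length_pyRange_one]
      omega
    rw [zipStar_square n.toNat _ hne hlen, foldl_append_id, List.nil_append,
        List.flatMap_map, colM]
    apply List.flatMap_congr
    intro i hi
    rw [List.mem_range] at hi
    simp only [id, List.map_map, PySem.List.pyRange_zero n, List.map_map]
    apply List.map_congr_left
    intro r _
    simp only [Function.comp]
    have hidx : (i : Nat) < (PySem.List.pyRange ((r : Int) * n + 1) ((r : Int) * n + n + 1) 1).length := by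
      rw [PySem.List.length_pyRange_one]
      omega
    rw [List.getD_eq_getElem _ _ hidx, PySem.List.getElem_pyRange_one]
    ring
  · have hm : n.toNat = 0 := by omega
    have hrange : PySem.List.pyRange 0 n 1 = [] := PySem.List.pyRange_one_eq_nil (by omega)
    rw [hrange, List.map_nil]
    rw [zipStar, dif_neg (by simp), List.foldl_nil]
    simp [colM, hm]

-- ===== VERDICT =====
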